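-- pv_equiv track=rewrite | github.com/Leanndrosouza/tcc-recomendacao | app/utils.py | conta_estabelecimentos
-- ===== SOURCE A (Python) =====
-- VALID_POINTS = ['point_of_interest',
--  'establishment',
--  'store',
--  'political',
--  'food',
--  'health',
--  'clothing_store',
--  'sublocality_level_1',
--  'sublocality',
--  'locality',
--  'finance',
--  'restaurant',
--  'home_goods_store',
--  'general_contractor',
--  'lodging',
--  'place_of_worship',
--  'church',
--  'electronics_store',
--  'school',
--  'beauty_salon']
--
-- def conta_estabelecimentos(pontos_proximos):
--     pontos_validos = {}
--     for ponto in pontos_proximos: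
--         if 'types' in ponto:
--             for tp in ponto['types']:
--                 if tp in VALID_POINTS:
--                     pontos_validos[tp] = True
--     return len(pontos_validos)
-- ===== SOURCE B (Python) =====
-- VALID_POINTS = ['point_of_interest',
--  'establishment',
--  'store',
--  'political',
--  'food',
--  'health',
--  'clothing_store',
--  'sublocality_level_1',
--  'sublocality',
--  'locality',
--  'finance',
--  'restaurant',
--  'home_goods_store',
--  'general_contractor',
--  'lodging',
--  'place_of_worship',
--  'church',
--  'electronics_store',
--  'school',
--  'beauty_salon']
--
-- def conta_estabelecimentos(pontos_proximos):
--     # Inverted traversal: for each valid type, ask whether any nearby point mentions it.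
--     # No set/dict accumulator is needed: VALID_POINTS has no duplicates, so each valid
--     # type contributes at most 1 to the count, exactly like A's dict of distinct keys.
--     return sum(
--         1
--         for tp in VALID_POINTS
--         if any('types' in ponto and tp in ponto['types'] for ponto in pontos_proximos)
--     )
-- ===== Notes on version B (the rewrite author's own statement) =====
-- stated objective: alternative
-- what changed: Inverts the loop nesting: instead of scanning points and accumulating distinct valid types in a dict, B iterates over the fixed VALID_POINTS list and counts each type for which some point's 'types' contains it, eliminating the accumulator entirely (correct because VALID_POINTS is duplicate-free).
import Mathlib
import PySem

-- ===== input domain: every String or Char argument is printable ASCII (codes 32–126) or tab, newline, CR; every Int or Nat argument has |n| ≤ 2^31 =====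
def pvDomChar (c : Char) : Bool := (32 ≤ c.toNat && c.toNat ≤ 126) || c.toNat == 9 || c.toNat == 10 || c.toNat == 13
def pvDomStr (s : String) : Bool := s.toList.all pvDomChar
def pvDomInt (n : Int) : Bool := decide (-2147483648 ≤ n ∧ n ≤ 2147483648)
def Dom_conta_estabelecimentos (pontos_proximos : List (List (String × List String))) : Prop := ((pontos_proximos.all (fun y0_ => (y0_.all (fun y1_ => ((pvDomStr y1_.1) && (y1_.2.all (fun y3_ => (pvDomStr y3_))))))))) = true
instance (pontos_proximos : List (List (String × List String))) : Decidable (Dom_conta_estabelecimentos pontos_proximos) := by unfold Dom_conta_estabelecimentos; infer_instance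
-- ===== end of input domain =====

-- B inverts the loop nesting: it iterates over the fixed duplicate-free VALID_POINTS list and
-- counts each type mentioned by some point, so A's dict accumulator disappears; return values proved equal.

-- ===== PORT A =====
def VALID_POINTS : List String :=
  ["point_of_interest", "establishment", "store", "political", "food", "health",
   "clothing_store", "sublocality_level_1", "sublocality", "locality", "finance",
   "restaurant", "home_goods_store", "general_contractor", "lodging",
   "place_of_worship", "church", "electronics_store", "school", "beauty_salon"]

-- dict lookup of key 'types' (first-match per the dict convention); shared plumbing of both ports
def getTypes? (ponto : List (String × List String)) : Option (List String) :=
  match ponto.find? (fun p => p.1 == "types") with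
  | none => none
  | some p => some p.2

def conta_estabelecimentos (pontos_proximos : List (List (String × List String))) : Int :=
  let pontos_validos : PySem.Dict String Bool :=
    pontos_proximos.foldl
      (fun d ponto =>
        match getTypes? ponto with
        | none => d
        | some tps =>
            tps.foldl (fun d tp => if VALID_POINTS.contains tp then d.insert tp true else d) d)
      PySem.Dict.empty
  (pontos_validos.size : Int)

-- ===== PORT B =====
-- `'types' in ponto and tp in ponto['types']`
def mentions (ponto : List (String × List String)) (tp : String) : Bool :=
  match getTypes? ponto with
  | none => false
  | some tps => tps.contains tp

-- sum(1 for tp in VALID_POINTS if any(mentions(ponto, tp) for ponto in pontos_proximos))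
def conta_estabelecimentos_alt (pontos_proximos : List (List (String × List String))) : Int :=
  ((VALID_POINTS.countP
      (fun tp => pontos_proximos.any (fun ponto => mentions ponto tp))) : Int)

-- ===== PRECONDITION & SPEC =====
def Spec_conta_estabelecimentos (pontos_proximos : List (List (String × List String))) (out : Int) : Prop := out = conta_estabelecimentos_alt pontos_proximos
instance (pontos_proximos : List (List (String × List String))) (out : Int) : Decidable (Spec_conta_estabelecimentos pontos_proximos out) := by unfold Spec_conta_estabelecimentos; infer_instance

-- ===== CLAIM (what is proved, stated in full; the proofs are below) =====
def Claim_equal_conta_estabelecimentos : Prop := ∀ (pontos_proximos : List (List (String × List String))), Dom_conta_estabelecimentos pontos_proximos → Spec_conta_estabelecimentos pontos_proximos (conta_estabelecimentos pontos_proximos)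

-- ===== LEMMAS AND PROOFS =====

-- the multiset of type strings scanned by A's loop, in order
def allTypes (pontos : List (List (String × List String))) : List String :=
  pontos.flatMap (fun ponto => (getTypes? ponto).getD [])

theorem allTypes_cons (p : List (String × List String)) (ps : List (List (String × List String))) :
    allTypes (p :: ps) = (getTypes? p).getD [] ++ allTypes ps := by
  simp [allTypes]

-- A's inner conditional-insert loop = an insert loop over the filtered list
theorem innerA_eq (tps : List String) (d : PySem.Dict String Bool) :
    tps.foldl (fun d tp => if VALID_POINTS.contains tp then d.insert tp true else d) d
      = (tps.filter (fun tp => VALID_POINTS.contains tp)).foldl (fun d tp => d.insert tp true) d := by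
  rw [List.foldl_filter]

-- keys of A's dict after the whole loop
theorem keysA (pontos : List (List (String × List String))) (d : PySem.Dict String Bool) :
    (pontos.foldl
      (fun d ponto =>
        match getTypes? ponto with
        | none => d
        | some tps =>
            tps.foldl (fun d tp => if VALID_POINTS.contains tp then d.insert tp true else d) d)
      d).keys
    = PySem.Set.update d.keys ((allTypes pontos).filter (fun tp => VALID_POINTS.contains tp)) := by
  induction pontos generalizing d with
  | nil => simp [allTypes]
  | cons p ps ih =>
      rw [List.foldl_cons, allTypes_cons, List.filter_append]
      cases h : getTypes? p with
      | none => simpa [h] using ih d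
      | some tps =>
          simp only [Option.getD_some]
          rw [ih, innerA_eq, PySem.Dict.keys_foldl_insert, PySem.Set.update_append]

-- B's existential scan over the points sees exactly the members of allTypes
theorem any_mentions_iff (pontos : List (List (String × List String))) (tp : String) :
    (pontos.any (fun ponto => mentions ponto tp)) = true ↔ tp ∈ allTypes pontos := by
  simp only [List.any_eq_true, allTypes, List.mem_flatMap, mentions]
  constructor
  · rintro ⟨p, hp, hm⟩
    cases h : getTypes? p with
    | none => rw [h] at hm; exact absurd hm (by simp)
    | some tps =>
        rw [h] at hm
        exact ⟨p, hp, by simpa [h] using List.mem_of_elem_eq_true hm⟩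
  · rintro ⟨p, hp, hm⟩
    refine ⟨p, hp, ?_⟩
    cases h : getTypes? p with
    | none => rw [h] at hm; exact absurd hm (by simp)
    | some tps => rw [h] at hm; simpa using hm

theorem conta_estabelecimentos_spec : Claim_equal_conta_estabelecimentos := by
  intro pontos _
  unfold Spec_conta_estabelecimentos conta_estabelecimentos conta_estabelecimentos_alt
  dsimp only
  have hA := keysA pontos PySem.Dict.empty
  simp only [PySem.Dict.keys_empty, PySem.Set.update_nil_left] at hA
  have hperm :
      (PySem.Set.ofList ((allTypes pontos).filter (fun tp => VALID_POINTS.contains tp))).Perm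
        (VALID_POINTS.filter (fun tp => pontos.any (fun ponto => mentions ponto tp))) := by
    rw [List.perm_ext_iff_of_nodup (PySem.Set.nodup_ofList _)
      (List.Nodup.filter _ (by decide : VALID_POINTS.Nodup))]
    intro x
    simp only [PySem.Set.mem_ofList, List.mem_filter, any_mentions_iff]
    constructor
    · rintro ⟨hx, hv⟩; exact ⟨by simpa using hv, hx⟩
    · rintro ⟨hv, hx⟩; exact ⟨hx, by simpa using hv⟩
  have hsize :
      (List.foldl
        (fun d ponto =>
          match getTypes? ponto with
          | none => d
          | some tps =>
              tps.foldl (fun d tp => if VALID_POINTS.contains tp then d.insert tp true else d) d)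
        PySem.Dict.empty pontos).size
      = VALID_POINTS.countP (fun tp => pontos.any (fun ponto => mentions ponto tp)) := by
    have hk : ∀ d : PySem.Dict String Bool, d.size = d.keys.length := by
      intro d; simp [PySem.Dict.size, PySem.Dict.keys]
    rw [hk, hA, hperm.length_eq, List.countP_eq_length_filter]
  exact_mod_cast hsize
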